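-- pv_equiv track=rewrite | github.com/mitsuo0114/competitive_programming | python/atcoder/Grand031/A.py | solve
-- ===== SOURCE A (Python) =====
-- from collections import Counter
--
-- def solve(N, S):
--     d = 10**9 + 7
--     c = Counter(S)
--     ans = 1
--     for ch, count in c.items():
--         ans *= (count + 1)
--     ans %= d
--     return ans - 1
-- ===== SOURCE B (Python) =====
-- def solve(N, S):
--     t = sorted(S)
--     ans = 1
--     i = 0
--     n = len(t)
--     while i < n:
--         j = i + 1
--         while j < n and t[j] == t[i]:
--             j += 1
--         ans *= (j - i + 1)
--         i = j
--     ans %= 10**9 + 7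
--     return ans - 1
-- ===== Notes on version B (the rewrite author's own statement) =====
-- stated objective: alternative
-- what changed: Replaces the Counter hash-frequency tally with a sort-then-run-length scan: sort the characters and multiply (run length + 1) for each maximal run of equal characters, keeping the single mod-then-subtract-1 at the end.
import Mathlib
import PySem

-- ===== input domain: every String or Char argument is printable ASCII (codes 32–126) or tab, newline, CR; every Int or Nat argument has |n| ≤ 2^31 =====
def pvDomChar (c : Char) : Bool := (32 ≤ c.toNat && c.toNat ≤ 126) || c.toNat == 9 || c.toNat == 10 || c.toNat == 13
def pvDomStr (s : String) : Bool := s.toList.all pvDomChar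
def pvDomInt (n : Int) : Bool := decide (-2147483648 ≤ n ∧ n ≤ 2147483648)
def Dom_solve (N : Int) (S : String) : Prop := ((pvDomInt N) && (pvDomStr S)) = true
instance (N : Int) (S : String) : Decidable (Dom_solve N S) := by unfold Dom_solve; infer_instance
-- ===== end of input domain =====

-- B replaces A's Counter frequency tally with a sort-then-run-length scan (alternative decomposition, same result).
-- ===== PORT A =====
-- A: build Counter(S), multiply (count+1) over its items, then ans %= 10^9+7 and return ans - 1.
def solve (_N : Int) (S : String) : Int :=
  let d : Int := 10 ^ 9 + 7
  let c := PySem.Dict.counter S.toList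
  let ans : Int := c.items.foldl (fun a p => a * (p.2 + 1)) 1
  PySem.Int.mod ans d - 1

-- ===== PORT B =====
-- B's outer while-loop: each step consumes one maximal run of characters equal to the
-- current head (the inner while-loop is the takeWhile/dropWhile split) and multiplies (run length + 1).
def runProd : List Char → Int
  | [] => 1
  | c :: rest =>
      (((rest.takeWhile (fun x => x == c)).length : Int) + 2) *
        runProd (rest.dropWhile (fun x => x == c))
  termination_by t => t.length
  decreasing_by
    simp only [List.length_cons]
    exact Nat.lt_succ_of_le (List.length_dropWhile_le _ rest)

def solve_alt (_N : Int) (S : String) : Int :=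
  let t := PySem.List.sorted S.toList (fun c => c)
  let ans : Int := runProd t
  PySem.Int.mod ans (10 ^ 9 + 7) - 1

-- ===== PRECONDITION & SPEC =====
def Spec_solve (N : Int) (S : String) (out : Int) : Prop := out = solve_alt N S
instance (N : Int) (S : String) (out : Int) : Decidable (Spec_solve N S out) := by unfold Spec_solve; infer_instance

-- ===== CLAIM (what is proved, stated in full; the proofs are below) =====
def Claim_equal_solve : Prop := ∀ (N : Int) (S : String), Dom_solve N S → Spec_solve N S (solve N S)

-- ===== LEMMAS AND PROOFS =====

/-- A's item fold is the product of the mapped factors. -/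
theorem foldl_mul_items (l : List (Char × Int)) (a : Int) :
    l.foldl (fun a p => a * (p.2 + 1)) a = a * (l.map (fun p => p.2 + 1)).prod := by
  induction l generalizing a with
  | nil => simp
  | cons p l ih => simp [List.foldl_cons, ih, mul_assoc]

/-- In a sorted list whose elements are all ≥ c, dropping the leading run of c's
    removes every occurrence of c. -/
theorem not_mem_dropWhile_eq (c : Char) :
    ∀ l : List Char, List.Pairwise (· ≤ ·) l → (∀ x ∈ l, c ≤ x) →
      c ∉ l.dropWhile (fun x => x == c) := by
  intro l
  induction l with
  | nil => simp
  | cons h tl ih =>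
    intro hsort hge
    by_cases hc : (h == c) = true
    · rw [List.dropWhile_cons, if_pos hc]
      exact ih (List.pairwise_cons.mp hsort).2
        (fun x hx => le_trans (hge h List.mem_cons_self)
          ((List.pairwise_cons.mp hsort).1 x hx))
    · rw [List.dropWhile_cons, if_neg hc]
      intro hmem
      have hne : h ≠ c := by simpa using hc
      rcases List.mem_cons.mp hmem with h1 | h1
      · exact hne h1.symm
      · have : h ≤ c := (List.pairwise_cons.mp hsort).1 c h1
        exact hne (le_antisymm this (hge h List.mem_cons_self))

/-- Run-length product over a sorted list = product of (count+1) over any nodup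
    enumeration `u` of its elements. -/
theorem runProd_eq : ∀ (n : Nat) (t u : List Char), t.length ≤ n →
    List.Pairwise (· ≤ ·) t → u.Nodup → (∀ x, x ∈ u ↔ x ∈ t) →
    runProd t = (u.map (fun c => ((t.count c : Int) + 1))).prod := by
  intro n
  induction n with
  | zero =>
    intro t u hlen _ _ hmem
    have ht : t = [] := List.eq_nil_of_length_eq_zero (Nat.le_zero.mp hlen)
    subst ht
    have hu : u = [] := List.eq_nil_iff_forall_not_mem.mpr (fun a ha => by
      simpa using (hmem a).mp ha)
    subst hu; rw [runProd]; simp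
  | succ n ih =>
    intro t u hlen hsort hnd hmem
    cases t with
    | nil =>
      have hu : u = [] := List.eq_nil_iff_forall_not_mem.mpr (fun a ha => by
        simpa using (hmem a).mp ha)
      subst hu; rw [runProd]; simp
    | cons c rest =>
      set s := rest.takeWhile (fun x => x == c) with hs
      set r := rest.dropWhile (fun x => x == c) with hr
      have hsr : s ++ r = rest := List.takeWhile_append_dropWhile
      have hsc : ∀ x ∈ s, x = c := fun x hx => by
        have := List.mem_takeWhile_imp hx
        simpa using this
      have hcr : c ∉ r :=
        not_mem_dropWhile_eq c rest (List.pairwise_cons.mp hsort).2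
          (fun x hx => (List.pairwise_cons.mp hsort).1 x hx)
      have hcu : c ∈ u := (hmem c).mpr List.mem_cons_self
      have hperm : u.Perm (c :: u.erase c) := List.perm_cons_erase hcu
      have hcount_c : (c :: rest).count c = s.length + 1 := by
        have hsl : s.count c = s.length := by
          rw [List.count_eq_length]
          intro x hx; simp [hsc x hx]
        have hrl : r.count c = 0 := List.count_eq_zero.mpr hcr
        calc (c :: rest).count c = rest.count c + 1 := by simp
          _ = (s ++ r).count c + 1 := by rw [hsr]
          _ = s.length + 1 := by simp [List.count_append, hsl, hrl]
      have hcount_r : ∀ x ∈ u.erase c, (c :: rest).count x = r.count x := by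
        intro x hx
        have hxne : x ≠ c := (hnd.mem_erase_iff.mp hx).1
        have hxs : s.count x = 0 := List.count_eq_zero.mpr (fun h => hxne (hsc x h))
        calc (c :: rest).count x = rest.count x := by
              simp [Ne.symm hxne]
          _ = (s ++ r).count x := by rw [hsr]
          _ = r.count x := by simp [List.count_append, hxs]
      have hrlen : r.length ≤ n := by
        have h1 : r.length ≤ rest.length := List.length_dropWhile_le _ _
        simp only [List.length_cons] at hlen; omega
      have hrsort : List.Pairwise (· ≤ ·) r :=
        (List.pairwise_cons.mp hsort).2.sublist (List.dropWhile_sublist _)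
      have hrmem : ∀ x, x ∈ u.erase c ↔ x ∈ r := by
        intro x
        rw [hnd.mem_erase_iff, hmem]
        constructor
        · rintro ⟨hxne, hx⟩
          rcases List.mem_cons.mp hx with h | h
          · exact absurd h hxne
          · rw [← hsr] at h
            rcases List.mem_append.mp h with h | h
            · exact absurd (hsc x h) hxne
            · exact h
        · intro hx
          refine ⟨fun h => hcr (h ▸ hx), ?_⟩
          exact List.mem_cons_of_mem _ (hsr ▸ List.mem_append_right s hx)
      have hih := ih r (u.erase c) hrlen hrsort (hnd.erase c) hrmem
      have hprod : (u.map (fun x => (((c :: rest).count x : Int) + 1))).prod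
          = (((c :: rest).count c : Int) + 1) * ((u.erase c).map (fun x => ((r.count x : Int) + 1))).prod := by
        rw [(hperm.map (fun x => (((c :: rest).count x : Int) + 1))).prod_eq]
        simp only [List.map_cons, List.prod_cons]
        refine congrArg _ (congrArg List.prod (List.map_congr_left ?_))
        intro x hx
        rw [hcount_r x hx]
      rw [runProd, hih, hprod, hcount_c]
      push_cast
      ring

-- ===== VERDICT (by name: the statement is the Claim_ definition above) =====
theorem solve_spec : Claim_equal_solve := by
  intro N S _
  unfold Spec_solve solve solve_alt
  simp only
  congr 1
  congr 1
  rw [PySem.Dict.items_counter, foldl_mul_items, one_mul, List.map_map]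
  have hperm := PySem.List.sorted_perm S.toList (fun c => c) false
  rw [runProd_eq (PySem.List.sorted S.toList (fun c => c)).length
      (PySem.List.sorted S.toList (fun c => c)) (PySem.Set.ofList S.toList)
      le_rfl (PySem.List.sorted_pairwise S.toList (fun c => c))
      (PySem.Set.nodup_ofList S.toList)
      (fun x => (PySem.Set.mem_ofList S.toList x).trans hperm.mem_iff.symm)]
  refine congrArg List.prod (List.map_congr_left ?_)
  intro x _
  simp [hperm.count_eq x]
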